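-- pv_equiv track=rewrite | github.com/Sanady/dataforge-py | src/dataforge/backend.py | _parse_char_class
-- ===== SOURCE A (Python) =====
-- def _parse_char_class(spec: str) -> str:
--     """Parse a character class interior like ``a-zA-Z0-9``."""
--     chars: list[str] = []
--     i = 0
--     n = len(spec)
--     while i < n:
--         if i + 2 < n and spec[i + 1] == "-":
--             lo = ord(spec[i])
--             hi = ord(spec[i + 2])
--             chars.extend(chr(c) for c in range(lo, hi + 1))
--             i += 3
--         else:
--             chars.append(spec[i])
--             i += 1
--     return "".join(chars) if chars else "?"
-- ===== SOURCE B (Python) =====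
-- import re
--
-- _TOKEN = re.compile(r"(.)-(.)|(.)", re.DOTALL)
--
-- def _parse_char_class(spec: str) -> str:
--     pieces = []
--     for m in _TOKEN.finditer(spec):
--         lo, hi, single = m.groups()
--         if single is None:
--             pieces.append("".join(chr(c) for c in range(ord(lo), ord(hi) + 1)))
--         else:
--             pieces.append(single)
--     result = "".join(pieces)
--     return result if result else "?"
-- ===== Notes on version B (the rewrite author's own statement) =====
-- stated objective: idiomatic
-- what changed: Replaces the manual index arithmetic with two-char lookahead by regex tokenization of the spec (re.finditer with DOTALL over a pattern matching either a three-char range token or a single char), expanding each range token and joining the pieces.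
import Mathlib
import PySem

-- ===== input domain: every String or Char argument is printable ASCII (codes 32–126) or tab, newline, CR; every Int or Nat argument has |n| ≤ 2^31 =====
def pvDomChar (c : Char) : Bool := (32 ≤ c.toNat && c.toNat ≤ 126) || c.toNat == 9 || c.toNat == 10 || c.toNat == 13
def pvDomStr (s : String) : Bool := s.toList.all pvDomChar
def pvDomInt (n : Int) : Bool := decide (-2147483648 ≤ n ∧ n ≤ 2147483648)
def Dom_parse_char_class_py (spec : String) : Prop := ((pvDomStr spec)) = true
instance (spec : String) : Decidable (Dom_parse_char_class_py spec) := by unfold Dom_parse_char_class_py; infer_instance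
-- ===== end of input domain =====

-- B replaces A's index-arithmetic scan with regex tokenization of the spec; return values proved equal on Dom.
-- ===== PORT A =====
-- while loop over index i, accumulating chars; terminates since n - i decreases
def parseA_loop (cs : List Char) (n : Nat) (i : Nat) (chars : List Char) : List Char :=
  if _h : i < n then
    if i + 2 < n ∧ cs[i+1]? = some '-' then
      let lo := (cs[i]?.getD ' ').toNat
      let hi := (cs[i+2]?.getD ' ').toNat
      parseA_loop cs n (i+3) (chars ++ (List.range' lo (hi + 1 - lo)).map Char.ofNat)
    else
      parseA_loop cs n (i+1) (chars ++ [cs[i]?.getD ' '])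
  else chars
termination_by n - i

def parse_char_class_py (spec : String) : String :=
  let cs := spec.toList
  let chars := parseA_loop cs cs.length 0 []
  if chars.isEmpty then "?" else String.ofList chars

-- ===== PORT B =====
-- finditer over the regex '(.)-(.)|(.)' with DOTALL tokenizes the spec leftmost-first:
-- at each position it consumes "c '-' c" if present, otherwise one character.  No Lean regex
-- engine exists, so this tokenization is ported exactly as the equivalent pattern-match
-- recursion on the character list (exact for this pattern: '.' with DOTALL matches any char).
def parseB_tokens : List Char → List Char
  | lo :: '-' :: hi :: rest =>
      (List.range' lo.toNat (hi.toNat + 1 - lo.toNat)).map Char.ofNat ++ parseB_tokens rest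
  | c :: rest => c :: parseB_tokens rest
  | [] => []

def parse_char_class_py_alt (spec : String) : String :=
  let result := parseB_tokens spec.toList
  if result.isEmpty then "?" else String.ofList result


-- ===== PORT B =====
-- ===== PRECONDITION & SPEC =====
def Spec_parse_char_class_py (spec : String) (out : String) : Prop := out = parse_char_class_py_alt spec
instance (spec : String) (out : String) : Decidable (Spec_parse_char_class_py spec out) := by unfold Spec_parse_char_class_py; infer_instance

-- ===== CLAIM (what is proved, stated in full; the proofs are below) =====
def Claim_equal_parse_char_class_py : Prop := ∀ (spec : String), Dom_parse_char_class_py spec → Spec_parse_char_class_py spec (parse_char_class_py spec)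

-- ===== LEMMAS AND PROOFS =====
-- Loop invariant: A's scan from position i equals chars ++ B's tokenization of the rest.
theorem parseA_loop_eq (cs : List Char) (i : Nat) (chars : List Char) :
    parseA_loop cs cs.length i chars = chars ++ parseB_tokens (cs.drop i) := by
  fun_induction parseA_loop cs cs.length i chars with
  | case1 i chars h hc lo hi ih =>
      obtain ⟨h2, hdash⟩ := hc
      have hd1 : cs[i+1] = '-' := by
        have := List.getElem?_eq_getElem (l := cs) (i := i+1) (by omega)
        rw [this] at hdash; exact Option.some.inj hdash
      have e : List.drop i cs = cs[i] :: '-' :: cs[i+2] :: List.drop (i+3) cs := by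
        rw [List.drop_eq_getElem_cons h,
            List.drop_eq_getElem_cons (show i+1 < cs.length by omega),
            List.drop_eq_getElem_cons (show i+2 < cs.length by omega), hd1]
      rw [ih, e, parseB_tokens]
      simp [lo, hi, h, h2]
  | case2 i chars h hc ih =>
      have hget : cs[i]?.getD ' ' = cs[i] := by simp [List.getElem?_eq_getElem h]
      rw [ih, List.drop_eq_getElem_cons h, hget]
      conv_rhs => rw [parseB_tokens.eq_def]
      split
      · rename_i lo hi rest heq
        exfalso
        have hlen : i + 2 < cs.length := by
          have : (List.drop (i+1) cs).length = cs.length - (i+1) := List.length_drop ..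
          have h2 : ('-' :: hi :: rest).length = cs.length - (i+1) := by
            rw [← this]; exact congrArg List.length (List.cons.inj heq).2.symm
          simp at h2; omega
        have hd : cs[i+1] = '-' := by
          have e2 : List.drop (i+1) cs = cs[i+1] :: List.drop (i+2) cs :=
            List.drop_eq_getElem_cons (by omega)
          have := (List.cons.inj heq).2
          rw [e2] at this
          exact ((List.cons.inj this.symm).1).symm
        exact hc ⟨hlen, by rw [List.getElem?_eq_getElem (by omega), hd]⟩
      · rename_i c rest _ heq
        obtain ⟨rfl, rfl⟩ := List.cons.inj heq
        simp
      · rename_i heq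
        exact absurd heq (List.cons_ne_nil _ _)
  | case3 i chars h =>
      simp [List.drop_eq_nil_of_le (by omega : cs.length ≤ i), parseB_tokens]

-- ===== VERDICT (by name: the statement is the Claim_ definition above) =====
theorem parse_char_class_py_spec : Claim_equal_parse_char_class_py := by
  intro spec _
  unfold Spec_parse_char_class_py parse_char_class_py parse_char_class_py_alt
  simp only []
  rw [parseA_loop_eq spec.toList 0 []]
  simp
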